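-- pv_equiv track=rewrite | github.com/KartikKrishnan05/TelloDrone | ArucoTagScripts/Floor/mainFlightBack.py | combine_consecutive_turns
-- ===== SOURCE A (Python) =====
-- def combine_consecutive_turns(flight_log):
--     optimized_log = []
--     current_rotation = None
--     accumulated_rotation = 0
--
--     for command, value in flight_log:
--         if command == 'rotate_cw' or command == 'rotate_ccw':
--             if current_rotation is None:
--                 # Start tracking a new rotation
--                 current_rotation = command
--                 accumulated_rotation = value
--             elif current_rotation == command:
--                 # Add up consecutive turns in the same direction
--                 accumulated_rotation += value
--             else:
--                 # Log the previous rotation and start a new one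
--                 optimized_log.append((current_rotation, accumulated_rotation))
--                 current_rotation = command
--                 accumulated_rotation = value
--         else:
--             # If the command is not a rotation, finalize the current rotation
--             if current_rotation is not None:
--                 optimized_log.append((current_rotation, accumulated_rotation))
--                 current_rotation = None
--                 accumulated_rotation = 0
--             # Log the non-rotation command
--             optimized_log.append((command, value))
--
--     # After the loop, make sure to log any remaining rotation
--     if current_rotation is not None:
--         optimized_log.append((current_rotation, accumulated_rotation))
--
--     return optimized_log
-- ===== SOURCE B (Python) =====
-- def combine_consecutive_turns(flight_log):
--     optimized = []
--     n = len(flight_log)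
--     i = 0
--     while i < n:
--         command = flight_log[i][0]
--         j = i
--         while j < n and flight_log[j][0] == command:
--             j += 1
--         if command in ('rotate_cw', 'rotate_ccw'):
--             optimized.append((command, sum(v for _, v in flight_log[i:j])))
--         else:
--             optimized.extend(flight_log[i:j])
--         i = j
--     return optimized
-- ===== Notes on version B (the rewrite author's own statement) =====
-- stated objective: simpler
-- what changed: Replaced A's element-by-element state machine (pending rotation name + accumulator with flush logic) by a run-based scan: split the log into maximal runs of equal command names, emit one summed tuple per rotation run and the run's elements verbatim otherwise.
import Mathlib
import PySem

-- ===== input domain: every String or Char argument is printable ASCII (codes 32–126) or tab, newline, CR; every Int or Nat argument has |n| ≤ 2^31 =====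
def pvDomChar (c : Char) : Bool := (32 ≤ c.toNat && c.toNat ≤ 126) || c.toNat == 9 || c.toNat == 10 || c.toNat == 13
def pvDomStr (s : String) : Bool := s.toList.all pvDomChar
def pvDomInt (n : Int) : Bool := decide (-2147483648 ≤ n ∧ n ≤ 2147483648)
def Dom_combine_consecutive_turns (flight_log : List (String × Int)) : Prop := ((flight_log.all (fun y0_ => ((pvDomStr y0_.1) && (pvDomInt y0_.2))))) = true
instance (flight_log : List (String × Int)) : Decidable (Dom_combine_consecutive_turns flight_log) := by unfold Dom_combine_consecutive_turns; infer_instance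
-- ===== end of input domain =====

-- B replaces A's pending-rotation state machine by a run-based scan over maximal runs of
-- equal command names (objective: simpler).

-- ===== PORT A =====
-- one loop iteration of A: state = (optimized_log, current_rotation, accumulated_rotation)
def stepA (s : List (String × Int) × Option String × Int) (cv : String × Int) :
    List (String × Int) × Option String × Int :=
  let (optimized_log, current_rotation, accumulated_rotation) := s
  let (command, value) := cv
  if command == "rotate_cw" || command == "rotate_ccw" then
    match current_rotation with
    | none => (optimized_log, some command, value)
    | some c =>
      if c == command then
        (optimized_log, some c, accumulated_rotation + value)
      else
        (optimized_log ++ [(c, accumulated_rotation)], some command, value)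
  else
    match current_rotation with
    | some c => (optimized_log ++ [(c, accumulated_rotation)] ++ [(command, value)], none, 0)
    | none => (optimized_log ++ [(command, value)], none, 0)

-- A's trailing flush after the loop
def finA (s : List (String × Int) × Option String × Int) : List (String × Int) :=
  match s.2.1 with
  | some c => s.1 ++ [(c, s.2.2)]
  | none => s.1

def combine_consecutive_turns (flight_log : List (String × Int)) : List (String × Int) :=
  finA (flight_log.foldl stepA ([], none, 0))

-- ===== PORT B =====
-- B's inner `while j < n and flight_log[j][0] == command` scan: values of the run, and the rest
def spanCmd (c : String) : List (String × Int) → List Int × List (String × Int)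
  | [] => ([], [])
  | (d, v) :: rest =>
    if d == c then
      let (vs, r) := spanCmd c rest
      (v :: vs, r)
    else ([], (d, v) :: rest)

theorem spanCmd_len (c : String) : ∀ l : List (String × Int), (spanCmd c l).2.length ≤ l.length := by
  intro l
  induction l with
  | nil => simp [spanCmd]
  | cons hd tl ih =>
    obtain ⟨d, v⟩ := hd
    by_cases h : (d == c) = true
    · simp only [spanCmd, h, if_pos, List.length_cons]
      exact le_trans ih (by omega)
    · simp [spanCmd, h]

def combine_consecutive_turns_alt (flight_log : List (String × Int)) : List (String × Int) :=
  match flight_log with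
  | [] => []
  | (c, v) :: rest =>
    (if c == "rotate_cw" || c == "rotate_ccw" then
      [(c, (v :: (spanCmd c rest).1).sum)]
     else
      (c, v) :: (spanCmd c rest).1.map (fun w => (c, w))) ++
    combine_consecutive_turns_alt (spanCmd c rest).2
termination_by flight_log.length
decreasing_by
  have := spanCmd_len c rest
  simp only [List.length_cons]
  omega

-- ===== PRECONDITION & SPEC =====
def Spec_combine_consecutive_turns (flight_log : List (String × Int)) (out : List (String × Int)) : Prop := out = combine_consecutive_turns_alt flight_log
instance (flight_log : List (String × Int)) (out : List (String × Int)) : Decidable (Spec_combine_consecutive_turns flight_log out) := by unfold Spec_combine_consecutive_turns; infer_instance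

-- ===== CLAIM (what is proved, stated in full; the proofs are below) =====
def Claim_equal_combine_consecutive_turns : Prop := ∀ (flight_log : List (String × Int)), Dom_combine_consecutive_turns flight_log → Spec_combine_consecutive_turns flight_log (combine_consecutive_turns flight_log)

-- ===== LEMMAS AND PROOFS =====

-- A's loop rephrased as structural recursion on the list, with the pending rotation as an option
def Baux : Option (String × Int) → List (String × Int) → List (String × Int)
  | p, [] => (match p with | none => [] | some pr => [pr])
  | p, (c, v) :: rest =>
    if c == "rotate_cw" || c == "rotate_ccw" then
      match p with
      | none => Baux (some (c, v)) rest
      | some (d, a) =>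
        if d == c then Baux (some (d, a + v)) rest
        else (d, a) :: Baux (some (c, v)) rest
    else
      (match p with | some pr => [pr] | none => []) ++ (c, v) :: Baux none rest

def pend : Option String → Int → Option (String × Int)
  | none, _ => none
  | some c, a => some (c, a)

theorem foldA_eq : ∀ (l : List (String × Int)) (log : List (String × Int)) (cur : Option String) (acc : Int),
    finA (l.foldl stepA (log, cur, acc)) = log ++ Baux (pend cur acc) l := by
  intro l
  induction l with
  | nil => intro log cur acc; cases cur <;> simp [finA, Baux, pend]
  | cons hd tl ih =>
    intro log cur acc
    obtain ⟨c, v⟩ := hd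
    by_cases hr : (c == "rotate_cw" || c == "rotate_ccw") = true
    · cases cur with
      | none => simp [List.foldl, stepA, hr, ih, Baux, pend]
      | some d =>
        by_cases hd : (d == c) = true
        · simp [List.foldl, stepA, hr, hd, ih, Baux, pend]
        · simp [List.foldl, stepA, hr, hd, ih, Baux, pend]
    · cases cur with
      | none => simp [List.foldl, stepA, hr, ih, Baux, pend]
      | some d => simp [List.foldl, stepA, hr, ih, Baux, pend]

theorem Baux_rot (c : String) (hr : (c == "rotate_cw" || c == "rotate_ccw") = true) :
    ∀ (l : List (String × Int)) (a : Int),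
      Baux (some (c, a)) l = (c, a + (spanCmd c l).1.sum) :: Baux none (spanCmd c l).2 := by
  intro l
  induction l with
  | nil => intro a; simp [Baux, spanCmd]
  | cons hd tl ih =>
    intro a
    obtain ⟨e, v⟩ := hd
    by_cases he : (e == c) = true
    · have hec : e = c := by exact eq_of_beq he
      subst hec
      have h1 : Baux (some (e, a)) ((e, v) :: tl) = Baux (some (e, a + v)) tl := by
        simp [Baux, hr]
      have h2 : spanCmd e ((e, v) :: tl) = (v :: (spanCmd e tl).1, (spanCmd e tl).2) := by
        simp [spanCmd]
      rw [h1, ih (a + v), h2]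
      simp only [List.sum_cons]
      congr 1
      congr 1
      ring
    · have hce : (c == e) = false := by
        simp only [beq_eq_false_iff_ne]
        intro h
        exact he (by simp [h])
      by_cases hre : (e == "rotate_cw" || e == "rotate_ccw") = true
      · simp [spanCmd, he, Baux, hre, hce]
      · simp [spanCmd, he, Baux, hre]

theorem Baux_nonrot (c : String) (hr : (c == "rotate_cw" || c == "rotate_ccw") = false) :
    ∀ (vs : List Int) (r : List (String × Int)),
      Baux none (vs.map (fun w => (c, w)) ++ r) = vs.map (fun w => (c, w)) ++ Baux none r := by
  intro vs
  induction vs with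
  | nil => intro r; simp
  | cons w ws ih => intro r; simp [Baux, hr, ih]

theorem spanCmd_decomp (c : String) : ∀ l : List (String × Int),
    l = (spanCmd c l).1.map (fun w => (c, w)) ++ (spanCmd c l).2 := by
  intro l
  induction l with
  | nil => simp [spanCmd]
  | cons hd tl ih =>
    obtain ⟨d, v⟩ := hd
    by_cases hd2 : (d == c) = true
    · have : d = c := eq_of_beq hd2
      subst this
      simp only [spanCmd, hd2, if_pos]
      cases hs : spanCmd d tl with
      | mk vs r =>
        simp only [List.map_cons, List.cons_append, List.cons.injEq, true_and]
        rw [hs] at ih; simpa using ih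
    · simp [spanCmd, hd2]

theorem Baux_eq_alt_bounded : ∀ (n : Nat) (l : List (String × Int)), l.length ≤ n →
    Baux none l = combine_consecutive_turns_alt l := by
  intro n
  induction n with
  | zero =>
    intro l hl
    have : l = [] := List.eq_nil_of_length_eq_zero (Nat.le_zero.mp hl)
    subst this
    simp [Baux, combine_consecutive_turns_alt]
  | succ n ih =>
    intro l hl
    match l with
    | [] => simp [Baux, combine_consecutive_turns_alt]
    | (c, v) :: rest =>
      have hrlen : (spanCmd c rest).2.length ≤ n := by
        have := spanCmd_len c rest
        simp at hl
        omega
      by_cases hr : (c == "rotate_cw" || c == "rotate_ccw") = true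
      · rw [show Baux none ((c, v) :: rest) = Baux (some (c, v)) rest by simp [Baux, hr]]
        rw [Baux_rot c hr rest v, ih _ hrlen]
        simp [combine_consecutive_turns_alt, hr]
      · have hdec : rest = (spanCmd c rest).1.map (fun w => (c, w)) ++ (spanCmd c rest).2 :=
          spanCmd_decomp c rest
        rw [show Baux none ((c, v) :: rest) = (c, v) :: Baux none rest by simp [Baux, hr]]
        conv_lhs => rw [hdec]
        rw [Baux_nonrot c (by simpa using hr), ih _ hrlen]
        simp [combine_consecutive_turns_alt, hr]

theorem Baux_eq_alt (l : List (String × Int)) : Baux none l = combine_consecutive_turns_alt l :=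
  Baux_eq_alt_bounded l.length l (le_refl _)

-- ===== VERDICT (by name: the statement is the Claim_ definition above) =====
theorem combine_consecutive_turns_spec : Claim_equal_combine_consecutive_turns := by
  intro l _
  unfold Spec_combine_consecutive_turns combine_consecutive_turns
  rw [foldA_eq l [] none 0]
  simpa [pend] using Baux_eq_alt l
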